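-- pv_equiv track=rewrite | github.com/sangam223/Campus_Nav | CampusNavigator/main.py | dfs
-- ===== SOURCE A (Python) =====
-- def dfs(graph, start, goal):
--     visited = set()
--     stack = [[start]]
--     while stack:
--         path = stack.pop()
--         node = path[-1]
--         if node == goal:
--             return path, len(path) - 1
--         if node not in visited:
--             visited.add(node)
--             for neighbor in graph.get(node, {}):
--                 stack.append(path + [neighbor])
--     return None, None
-- ===== SOURCE B (Python) =====
-- def dfs(graph, start, goal):
--     # Same stack discipline as the original DFS, but stack entries are parent
--     # backpointers (indices into a node arena) instead of full path copies;
--     # the path is reconstructed once, at the goal.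
--     visited = set()
--     nodes = [start]
--     parents = [None]
--     stack = [0]
--     while stack:
--         i = stack.pop()
--         node = nodes[i]
--         if node == goal:
--             path = []
--             j = i
--             while j is not None:
--                 path.append(nodes[j])
--                 j = parents[j]
--             path.reverse()
--             return path, len(path) - 1
--         if node not in visited:
--             visited.add(node)
--             for neighbor in graph.get(node, {}):
--                 nodes.append(neighbor)
--                 parents.append(i)
--                 stack.append(len(nodes) - 1)
--     return None, None
-- ===== Notes on version B (the rewrite author's own statement) =====
-- stated objective: alternative
-- what changed: Stack entries store parent backpointers (indices into a node/parent arena) instead of full path copies; the path is reconstructed once when the goal is popped, so no per-push list copy is made.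
import Mathlib
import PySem

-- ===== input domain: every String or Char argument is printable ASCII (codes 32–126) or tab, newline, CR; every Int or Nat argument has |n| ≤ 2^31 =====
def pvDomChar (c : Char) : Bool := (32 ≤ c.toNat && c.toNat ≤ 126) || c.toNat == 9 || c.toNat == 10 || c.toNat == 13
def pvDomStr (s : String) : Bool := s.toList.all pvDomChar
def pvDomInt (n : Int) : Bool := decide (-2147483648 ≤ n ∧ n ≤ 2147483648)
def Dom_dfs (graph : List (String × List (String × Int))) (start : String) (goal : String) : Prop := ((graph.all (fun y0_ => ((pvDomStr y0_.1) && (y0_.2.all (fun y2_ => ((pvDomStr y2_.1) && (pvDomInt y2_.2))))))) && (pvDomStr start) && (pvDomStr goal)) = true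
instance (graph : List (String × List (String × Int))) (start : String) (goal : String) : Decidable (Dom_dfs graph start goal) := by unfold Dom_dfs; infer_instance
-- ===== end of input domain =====

-- B replaces A's stack of full path copies by per-entry parent backpointers with a single
-- path reconstruction at the goal (same traversal, a different data structure); objective: alternative.

-- ===== PORT A =====
-- shared fuel bound for both while-loops: each loop iteration pops one stack entry, and at
-- most 1 + Σ adjacency lengths entries are ever pushed (each node is expanded at most once),
-- so this fuel is never exhausted; it is a totality guard only, not part of the algorithm.
def dfsFuel (graph : List (String × List (String × Int))) : Nat :=
  graph.foldl (fun a p => a + p.2.length) 0 + 2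

def dfsA_loop (graph : List (String × List (String × Int))) (goal : String) :
    Nat → PySem.Set String → List (List String) → Option (List String) × Option Int
  | 0, _, _ => (none, none)
  | fuel+1, visited, stack =>
    match stack.getLast? with            -- while stack: path = stack.pop()
    | none => (none, none)
    | some path =>
      let stack' := stack.dropLast
      let node := (PySem.List.pyGet? path (-1)).getD ""   -- path is never empty here; the default is unreachable
      if node == goal then (some path, some ((path.length : Int) - 1))
      else if PySem.Set.contains visited node then
        dfsA_loop graph goal fuel visited stack'
      else
        dfsA_loop graph goal fuel (PySem.Set.add visited node)
          (((PySem.Dict.mk graph).getD node []).foldl (fun st pr => st ++ [path ++ [pr.1]]) stack')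

def dfs (graph : List (String × List (String × Int))) (start : String) (goal : String) :
    Option (List String) × Option Int :=
  dfsA_loop graph goal (dfsFuel graph) PySem.Set.empty [[start]]

-- ===== PORT B =====
-- while j is not None: path.append(nodes[j]); j = parents[j]  — fuel nodes.length is a
-- totality guard (parent pointers strictly decrease, so it is never exhausted)
def dfsB_recon (nodes : List String) (parents : List (Option Nat)) :
    Nat → Nat → List String → List String
  | 0, _, acc => acc
  | fuel+1, j, acc =>
    let acc' := acc ++ [nodes.getD j ""]
    match parents.getD j none with
    | none => acc'
    | some k => dfsB_recon nodes parents fuel k acc'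

def dfsB_loop (graph : List (String × List (String × Int))) (goal : String) :
    Nat → PySem.Set String → List String → List (Option Nat) → List Nat →
    Option (List String) × Option Int
  | 0, _, _, _, _ => (none, none)
  | fuel+1, visited, nodes, parents, stack =>
    match stack.getLast? with            -- while stack: i = stack.pop()
    | none => (none, none)
    | some i =>
      let stack' := stack.dropLast
      let node := nodes.getD i ""        -- node = nodes[i]; i is always in range
      if node == goal then
        let path := (dfsB_recon nodes parents nodes.length i []).reverse
        (some path, some ((path.length : Int) - 1))
      else if PySem.Set.contains visited node then
        dfsB_loop graph goal fuel visited nodes parents stack'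
      else
        let st := ((PySem.Dict.mk graph).getD node []).foldl
          (fun s pr => (s.1 ++ [pr.1], s.2.1 ++ [some i], s.2.2 ++ [s.1.length]))
          (nodes, parents, stack')
        dfsB_loop graph goal fuel (PySem.Set.add visited node) st.1 st.2.1 st.2.2

def dfs_alt (graph : List (String × List (String × Int))) (start : String) (goal : String) :
    Option (List String) × Option Int :=
  dfsB_loop graph goal (dfsFuel graph) PySem.Set.empty [start] [none] [0]

-- ===== PRECONDITION & SPEC =====
def Spec_dfs (graph : List (String × List (String × Int))) (start : String) (goal : String) (out : Option (List String) × Option Int) : Prop := out = dfs_alt graph start goal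
instance (graph : List (String × List (String × Int))) (start : String) (goal : String) (out : Option (List String) × Option Int) : Decidable (Spec_dfs graph start goal out) := by unfold Spec_dfs; infer_instance

-- ===== CLAIM (what is proved, stated in full; the proofs are below) =====
def Claim_equal_dfs : Prop := ∀ (graph : List (String × List (String × Int))) (start : String) (goal : String), Dom_dfs graph start goal → Spec_dfs graph start goal (dfs graph start goal)

-- ===== LEMMAS AND PROOFS =====

-- parent pointers always point strictly backwards
def WFp (parents : List (Option Nat)) : Prop :=
  ∀ j k, parents.getD j none = some k → k < j

-- relation between one A stack entry (a path) and one B stack entry (an index)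
def EntRel (nodes : List String) (parents : List (Option Nat))
    (p : List String) (i : Nat) : Prop :=
  i < nodes.length ∧ (dfsB_recon nodes parents (i+1) i []).reverse = p

theorem recon_acc (nodes : List String) (parents : List (Option Nat)) :
    ∀ (fuel j : Nat) (acc : List String),
    dfsB_recon nodes parents fuel j acc = acc ++ dfsB_recon nodes parents fuel j [] := by
  intro fuel
  induction fuel with
  | zero => intro j acc; simp [dfsB_recon]
  | succ f ih =>
    intro j acc
    simp only [dfsB_recon]
    cases h : parents.getD j none with
    | none => simp
    | some k =>
      show dfsB_recon nodes parents f k (acc ++ [nodes.getD j ""]) =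
        acc ++ dfsB_recon nodes parents f k ([] ++ [nodes.getD j ""])
      rw [ih k (acc ++ [nodes.getD j ""]), ih k ([] ++ [nodes.getD j ""])]
      simp

theorem recon_irrel (nodes : List String) (parents : List (Option Nat)) (hwf : WFp parents) :
    ∀ (j f₁ f₂ : Nat), j < f₁ → j < f₂ → ∀ acc,
    dfsB_recon nodes parents f₁ j acc = dfsB_recon nodes parents f₂ j acc := by
  intro j
  induction j using Nat.strong_induction_on with
  | _ j ih =>
    intro f₁ f₂ h₁ h₂ acc
    cases f₁ with
    | zero => omega
    | succ a =>
      cases f₂ with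
      | zero => omega
      | succ b =>
        simp only [dfsB_recon]
        cases h : parents.getD j none with
        | none => rfl
        | some k =>
          have hk := hwf j k h
          show dfsB_recon nodes parents a k (acc ++ [nodes.getD j ""]) =
            dfsB_recon nodes parents b k (acc ++ [nodes.getD j ""])
          exact ih k hk a b (by omega) (by omega) _

theorem recon_extend (nodes : List String) (parents : List (Option Nat))
    (hlen : parents.length = nodes.length) (hwf : WFp parents)
    (x : String) (p : Option Nat) :
    ∀ (fuel j : Nat) (acc : List String), j < nodes.length →
    dfsB_recon (nodes ++ [x]) (parents ++ [p]) fuel j acc =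
      dfsB_recon nodes parents fuel j acc := by
  intro fuel
  induction fuel with
  | zero => intro j acc _; rfl
  | succ f ih =>
    intro j acc hj
    have hn : (nodes ++ [x]).getD j "" = nodes.getD j "" := List.getD_append _ _ _ _ hj
    have hp : (parents ++ [p]).getD j none = parents.getD j none :=
      List.getD_append _ _ _ _ (by omega)
    simp only [dfsB_recon, hn, hp]
    cases h : parents.getD j none with
    | none => rfl
    | some k =>
      show dfsB_recon (nodes ++ [x]) (parents ++ [p]) f k (acc ++ [nodes.getD j ""]) =
        dfsB_recon nodes parents f k (acc ++ [nodes.getD j ""])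
      exact ih k _ (lt_trans (hwf j k h) hj)

theorem wfp_extend (parents : List (Option Nat)) (hwf : WFp parents)
    (i : Nat) (hi : i < parents.length) : WFp (parents ++ [some i]) := by
  intro j k h
  rcases lt_trichotomy j parents.length with hj | hj | hj
  · rw [List.getD_append _ _ _ _ hj] at h
    exact hwf j k h
  · rw [List.getD_append_right parents [some i] none j (by omega)] at h
    subst hj
    simp at h
    omega
  · rw [List.getD_append_right parents [some i] none j (by omega)] at h
    have : j - parents.length ≥ 1 := by omega
    rcases Nat.exists_eq_add_of_le this with ⟨m, hm⟩
    simp [hm, List.getD] at h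

theorem recon_head (nodes : List String) (parents : List (Option Nat)) :
    ∀ (fuel j : Nat), 0 < fuel →
    (dfsB_recon nodes parents fuel j []).head? = some (nodes.getD j "") := by
  intro fuel j hf
  cases fuel with
  | zero => omega
  | succ f =>
    simp only [dfsB_recon]
    cases h : parents.getD j none with
    | none => simp
    | some k =>
      show (dfsB_recon nodes parents f k ([] ++ [nodes.getD j ""])).head? =
        some (nodes.getD j "")
      rw [recon_acc]
      simp

theorem forall2_concat_cases {α β : Type} {R : α → β → Prop} :
    ∀ {l₁ : List α} {l₂ : List β}, List.Forall₂ R l₁ l₂ →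
    (l₁ = [] ∧ l₂ = []) ∨
      ∃ a b t₁ t₂, l₁ = t₁ ++ [a] ∧ l₂ = t₂ ++ [b] ∧ R a b ∧ List.Forall₂ R t₁ t₂ := by
  intro l₁ l₂ h
  induction h with
  | nil => left; exact ⟨rfl, rfl⟩
  | cons hab htl ih =>
    right
    rcases ih with ⟨h1, h2⟩ | ⟨a, b, t₁, t₂, e1, e2, hr, ht⟩
    · subst h1; subst h2
      exact ⟨_, _, [], [], rfl, rfl, hab, List.Forall₂.nil⟩
    · subst e1; subst e2
      exact ⟨a, b, _ :: t₁, _ :: t₂, rfl, rfl, hr, List.Forall₂.cons hab ht⟩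

theorem forall2_concat {α β : Type} {R : α → β → Prop} {a : α} {b : β} :
    ∀ {l₁ : List α} {l₂ : List β}, List.Forall₂ R l₁ l₂ → R a b →
    List.Forall₂ R (l₁ ++ [a]) (l₂ ++ [b]) := by
  intro l₁ l₂ h hab
  induction h with
  | nil => exact List.Forall₂.cons hab List.Forall₂.nil
  | cons hx ht ih => exact List.Forall₂.cons hx ih

theorem push_fold (i : Nat) :
    ∀ (adj : List (String × Int)) (nodes : List String) (parents : List (Option Nat))
      (stackA : List (List String)) (stackB : List Nat) (path : List String),
    WFp parents → parents.length = nodes.length →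
    List.Forall₂ (EntRel nodes parents) stackA stackB →
    i < nodes.length → (dfsB_recon nodes parents (i+1) i []).reverse = path →
    WFp (adj.foldl (fun s pr => (s.1 ++ [pr.1], s.2.1 ++ [some i], s.2.2 ++ [s.1.length]))
          (nodes, parents, stackB)).2.1 ∧
    (adj.foldl (fun s pr => (s.1 ++ [pr.1], s.2.1 ++ [some i], s.2.2 ++ [s.1.length]))
          (nodes, parents, stackB)).2.1.length =
      (adj.foldl (fun s pr => (s.1 ++ [pr.1], s.2.1 ++ [some i], s.2.2 ++ [s.1.length]))
          (nodes, parents, stackB)).1.length ∧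
    List.Forall₂ (EntRel
        (adj.foldl (fun s pr => (s.1 ++ [pr.1], s.2.1 ++ [some i], s.2.2 ++ [s.1.length]))
          (nodes, parents, stackB)).1
        (adj.foldl (fun s pr => (s.1 ++ [pr.1], s.2.1 ++ [some i], s.2.2 ++ [s.1.length]))
          (nodes, parents, stackB)).2.1)
      (adj.foldl (fun st pr => st ++ [path ++ [pr.1]]) stackA)
      (adj.foldl (fun s pr => (s.1 ++ [pr.1], s.2.1 ++ [some i], s.2.2 ++ [s.1.length]))
          (nodes, parents, stackB)).2.2 := by
  intro adj
  induction adj with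
  | nil =>
    intro nodes parents stackA stackB path hwf hlen hrel _ _
    exact ⟨hwf, hlen, hrel⟩
  | cons pr rest ih =>
    intro nodes parents stackA stackB path hwf hlen hrel hi hpath
    simp only [List.foldl_cons]
    have hwf' : WFp (parents ++ [some i]) := wfp_extend parents hwf i (by omega)
    have hlen' : (parents ++ [some i]).length = (nodes ++ [pr.1]).length := by
      simp [hlen]
    have hrel' : List.Forall₂ (EntRel (nodes ++ [pr.1]) (parents ++ [some i]))
        (stackA ++ [path ++ [pr.1]]) (stackB ++ [nodes.length]) := by
      apply forall2_concat
      · refine hrel.imp ?_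
        intro p j ⟨hj, hrec⟩
        refine ⟨by simp; omega, ?_⟩
        rw [recon_extend nodes parents hlen hwf _ _ _ _ _ hj]
        exact hrec
      · refine ⟨by simp, ?_⟩
        have h1 : (nodes ++ [pr.1]).getD nodes.length "" = pr.1 := by
          rw [List.getD_append_right nodes [pr.1] "" nodes.length (by omega)]
          simp
        have h2 : (parents ++ [some i]).getD nodes.length none = some i := by
          rw [List.getD_append_right parents [some i] none nodes.length (by omega)]
          simp [hlen]
        simp only [dfsB_recon, h1, h2]
        show (dfsB_recon (nodes ++ [pr.1]) (parents ++ [some i]) nodes.length i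
          ([] ++ [pr.1])).reverse = path ++ [pr.1]
        rw [recon_acc]
        rw [recon_extend nodes parents hlen hwf _ _ _ _ _ hi]
        rw [recon_irrel nodes parents hwf i nodes.length (i+1) hi (by omega)]
        simp [hpath]
    have hi' : i < (nodes ++ [pr.1]).length := by simp; omega
    have hpath' : (dfsB_recon (nodes ++ [pr.1]) (parents ++ [some i]) (i+1) i []).reverse
        = path := by
      rw [recon_extend nodes parents hlen hwf _ _ _ _ _ hi]
      exact hpath
    exact ih (nodes ++ [pr.1]) (parents ++ [some i]) (stackA ++ [path ++ [pr.1]])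
      (stackB ++ [nodes.length]) path hwf' hlen' hrel' hi' hpath'

theorem sim (graph : List (String × List (String × Int))) (goal : String) :
    ∀ (fuel : Nat) (visited : PySem.Set String) (stackA : List (List String))
      (nodes : List String) (parents : List (Option Nat)) (stackB : List Nat),
    WFp parents → parents.length = nodes.length →
    List.Forall₂ (EntRel nodes parents) stackA stackB →
    dfsA_loop graph goal fuel visited stackA =
      dfsB_loop graph goal fuel visited nodes parents stackB := by
  intro fuel
  induction fuel with
  | zero => intro _ _ _ _ _ _ _ _; rfl
  | succ f ih =>
    intro visited stackA nodes parents stackB hwf hlen hrel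
    rcases forall2_concat_cases hrel with ⟨h1, h2⟩ | ⟨path, i, tA, tB, e1, e2, ⟨hi, hpath⟩, htl⟩
    · subst h1; subst h2; rfl
    · subst e1; subst e2
      simp only [dfsA_loop, dfsB_loop, List.getLast?_concat, List.dropLast_concat]
      have hnode : (PySem.List.pyGet? path (-1)).getD "" = nodes.getD i "" := by
        rw [PySem.List.pyGet?_neg_one, ← hpath, List.getLast?_reverse,
          recon_head nodes parents (i+1) i (by omega)]
        rfl
      have hpathB : (dfsB_recon nodes parents nodes.length i []).reverse = path := by
        rw [recon_irrel nodes parents hwf i nodes.length (i+1) hi (by omega)]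
        exact hpath
      rw [hnode]
      by_cases hg : (nodes.getD i "" == goal) = true
      · simp only [hg, if_true]
        rw [hpathB]
      · simp only [hg, if_false, Bool.false_eq_true]
        by_cases hv : (PySem.Set.contains visited (nodes.getD i "")) = true
        · simp only [hv, if_true]
          exact ih visited tA nodes parents tB hwf hlen htl
        · simp only [hv, if_false, Bool.false_eq_true]
          obtain ⟨w1, w2, w3⟩ := push_fold i ((PySem.Dict.mk graph).getD (nodes.getD i "") [])
            nodes parents tA tB path hwf hlen htl hi hpath
          exact ih _ _ _ _ _ w1 w2 w3

-- ===== VERDICT (by name: the statement is the Claim_ definition above) =====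
theorem dfs_spec : Claim_equal_dfs := by
  unfold Claim_equal_dfs
  intro graph start goal _
  unfold Spec_dfs dfs dfs_alt
  apply sim
  · intro j k h
    match j with
    | 0 => simp [List.getD] at h
    | j+1 => simp [List.getD] at h
  · rfl
  · refine List.Forall₂.cons ⟨by simp, ?_⟩ List.Forall₂.nil
    simp [dfsB_recon, List.getD]
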